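-- pv_equiv track=rewrite | github.com/ishanvepa/pop-music-comparative-analyzer | music analyzer.py | analyze_chord_pairs
-- ===== SOURCE A (Python) =====
-- import math
--
-- def analyze_chord_pairs(pair_arr):
--     copyarr = pair_arr
--     chord_pair_nums = {}
--
--     for z in range(len(pair_arr)):
--         for j in range(len(copyarr)):
--             if pair_arr[j] not in chord_pair_nums:
--                 chord_pair_nums[pair_arr[j]] = 0
--             if(copyarr[j] == pair_arr[z]):
--                 chord_pair_nums[pair_arr[j]] += 1
--     for key in chord_pair_nums:
--         chord_pair_nums[key] = int(math.sqrt(chord_pair_nums[key]))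
--     return chord_pair_nums
-- ===== SOURCE B (Python) =====
-- def analyze_chord_pairs(pair_arr):
--     counts = {}
--     for p in pair_arr:
--         counts[p] = counts.get(p, 0) + 1
--     return counts
-- ===== Notes on version B (the rewrite author's own statement) =====
-- stated objective: faster
-- what changed: A builds each chord's count as count^2 via two nested index loops and then takes int(math.sqrt()) of every value; B is a single-pass frequency map that counts each element directly, with no nested scan and no sqrt post-pass.
import Mathlib
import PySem

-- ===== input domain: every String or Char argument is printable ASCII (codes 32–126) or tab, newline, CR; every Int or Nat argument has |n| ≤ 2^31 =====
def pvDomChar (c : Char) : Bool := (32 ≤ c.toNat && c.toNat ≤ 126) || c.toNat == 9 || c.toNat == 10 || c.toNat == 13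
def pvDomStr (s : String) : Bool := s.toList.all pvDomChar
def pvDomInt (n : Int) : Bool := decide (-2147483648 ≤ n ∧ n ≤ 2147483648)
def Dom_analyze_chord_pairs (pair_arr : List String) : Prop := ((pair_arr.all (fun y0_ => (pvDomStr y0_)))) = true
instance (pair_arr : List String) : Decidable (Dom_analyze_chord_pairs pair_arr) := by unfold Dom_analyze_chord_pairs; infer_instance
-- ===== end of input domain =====

-- B replaces A's quadratic nested-loop accumulation (each count built as count^2 and
-- then int(math.sqrt())-ed back) with a single-pass frequency map; proved equal on Dom.

-- ===== PORT A =====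
-- one step of A's inner j-loop (for the fixed outer element v = pair_arr[z], x = pair_arr[j]):
-- ensure the key exists with 0, then increment it when copyarr[j] == pair_arr[z].
-- 'chord_pair_nums[pair_arr[j]] += 1' is modify with default 0: exact, the key was just ensured present.
def pvStepA (v : String) (d : PySem.Dict String Int) (x : String) : PySem.Dict String Int :=
  let d1 := if d.contains x then d else d.insert x 0
  if x == v then d1.modify x 0 (· + 1) else d1

-- final pass 'chord_pair_nums[key] = int(math.sqrt(chord_pair_nums[key]))':
-- int(math.sqrt(·)) ported as Nat.sqrt, exact on these values (nonnegative perfect squares)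
def analyze_chord_pairs (pair_arr : List String) : List (String × Int) :=
  (((PySem.List.pyRange 0 (PySem.List.len pair_arr) 1).foldl (fun d z =>
      (PySem.List.pyRange 0 (PySem.List.len pair_arr) 1).foldl (fun d j =>
        pvStepA (PySem.List.pyGetD pair_arr z "") d (PySem.List.pyGetD pair_arr j "")) d)
      PySem.Dict.empty).items.map (fun p => (p.1, (Nat.sqrt p.2.toNat : Int))))

-- ===== PORT B =====
def analyze_chord_pairs_alt (pair_arr : List String) : List (String × Int) :=
  (pair_arr.foldl (fun counts p => counts.insert p (counts.getD p 0 + 1)) PySem.Dict.empty).items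

-- ===== PRECONDITION & SPEC =====
def Spec_analyze_chord_pairs (pair_arr : List String) (out : List (String × Int)) : Prop := out = analyze_chord_pairs_alt pair_arr
instance (pair_arr : List String) (out : List (String × Int)) : Decidable (Spec_analyze_chord_pairs pair_arr out) := by unfold Spec_analyze_chord_pairs; infer_instance

-- ===== CLAIM (what is proved, stated in full; the proofs are below) =====
def Claim_equal_analyze_chord_pairs : Prop := ∀ (pair_arr : List String), Dom_analyze_chord_pairs pair_arr → Spec_analyze_chord_pairs pair_arr (analyze_chord_pairs pair_arr)

-- ===== LEMMAS AND PROOFS =====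

-- value of one inner step
theorem pvStepA_getD (v : String) (d : PySem.Dict String Int) (x k : String) :
    (pvStepA v d x).getD k 0 = d.getD k 0 + (if x = v ∧ k = x then 1 else 0) := by
  unfold pvStepA
  by_cases hc : d.contains x
  · by_cases hv : x = v
    · subst hv
      by_cases hk : k = x <;> simp [hc, hk, PySem.Dict.getD_modify]
    · by_cases hk : k = x <;> simp [hc, hv, hk]
  · have hcf : d.contains x = false := by simpa using hc
    have h0 : d.getD x 0 = 0 := PySem.Dict.getD_of_not_contains d 0 hcf
    by_cases hv : x = v
    · subst hv
      by_cases hk : k = x <;>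
        simp [hcf, hk, PySem.Dict.getD_modify, PySem.Dict.getD_insert, h0]
    · by_cases hk : k = x <;> simp [hcf, hv, hk, PySem.Dict.getD_insert, h0]

-- keys of one inner step
theorem pvStepA_keys (v : String) (d : PySem.Dict String Int) (x : String) :
    (pvStepA v d x).keys = PySem.Set.add d.keys x := by
  unfold pvStepA
  by_cases hc : d.contains x
  · rw [PySem.Set.add_of_mem ((PySem.Dict.contains_iff_mem_keys d x).mp hc)]
    by_cases hv : x = v
    · subst hv
      simp only [hc, if_true, beq_self_eq_true, PySem.Dict.keys_modify]
      exact PySem.Dict.keys_insert_of_contains d _ hc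
    · simp [hc, hv]
  · have hcf : d.contains x = false := by simpa using hc
    have hm : x ∉ d.keys := fun h => hc ((PySem.Dict.contains_iff_mem_keys d x).mpr h)
    rw [PySem.Set.add_of_not_mem hm]
    by_cases hv : x = v
    · subst hv
      simp only [hcf, Bool.false_eq_true, if_false, beq_self_eq_true, if_true,
        PySem.Dict.keys_modify]
      rw [PySem.Dict.keys_insert_of_contains _ _ (PySem.Dict.contains_insert_self d x 0),
        PySem.Dict.keys_insert_of_not_contains d _ hcf]
    · simp [hcf, hv, PySem.Dict.keys_insert_of_not_contains d _ hcf]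

-- A's inner loop adds count(l, k) to key k exactly when k = v
theorem innerA_getD (l : List String) (d : PySem.Dict String Int) (v k : String) :
    (l.foldl (pvStepA v) d).getD k 0
      = d.getD k 0 + (if k = v then (l.count k : Int) else 0) := by
  induction l generalizing d with
  | nil => simp
  | cons x t ih =>
    simp only [List.foldl_cons, ih, pvStepA_getD, List.count_cons]
    by_cases hv : k = v
    · subst hv
      by_cases hx : x = k <;> simp [hx] <;> ring
    · have hnot : ¬(x = v ∧ k = x) := fun hp => hv (hp.2.trans hp.1)
      simp [hv, hnot]

theorem innerA_keys (l : List String) (d : PySem.Dict String Int) (v : String) :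
    (l.foldl (pvStepA v) d).keys = PySem.Set.update d.keys l := by
  induction l generalizing d with
  | nil => rfl
  | cons x t ih => simp only [List.foldl_cons, ih, pvStepA_keys]; rfl

-- A's outer loop: key k ends at count(l,k) * count(xs,k)
theorem outerA_getD (xs : List String) (l : List String) (d : PySem.Dict String Int) (k : String) :
    (l.foldl (fun d v => xs.foldl (pvStepA v) d) d).getD k 0
      = d.getD k 0 + (l.count k : Int) * (xs.count k : Int) := by
  induction l generalizing d with
  | nil => simp
  | cons v t ih =>
    simp only [List.foldl_cons, ih, innerA_getD, List.count_cons]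
    by_cases hv : k = v
    · subst hv; simp; ring
    · have hvk : ¬v = k := fun hp => hv hp.symm
      simp [hv, hvk]

theorem pvSet_update_of_subset (s : PySem.Set String) (l : List String) (h : ∀ x ∈ l, x ∈ s) :
    PySem.Set.update s l = s := by
  induction l generalizing s with
  | nil => rfl
  | cons x t ih =>
    have : PySem.Set.add s x = s := PySem.Set.add_of_mem (h x (by simp))
    simpa [PySem.Set.update, this] using ih s (fun y hy => h y (by simp [hy]))

theorem outerA_keys (xs : List String) (l : List String) (d : PySem.Dict String Int)
    (h : ∀ x ∈ xs, x ∈ d.keys) :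
    (l.foldl (fun d v => xs.foldl (pvStepA v) d) d).keys = d.keys := by
  induction l generalizing d with
  | nil => rfl
  | cons v t ih =>
    simp only [List.foldl_cons]
    rw [ih]
    · rw [innerA_keys, pvSet_update_of_subset _ _ h]
    · intro x hx; rw [innerA_keys, pvSet_update_of_subset _ _ h]; exact h x hx

-- a dict with nodup keys is its keys paired with their values
theorem pvItems_eq_map_keys (l : List (String × Int)) (h : (l.map Prod.fst).Nodup) :
    l = (l.map Prod.fst).map (fun k => (k, (PySem.Dict.mk l).getD k 0)) := by
  induction l with
  | nil => rfl
  | cons p t ih =>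
    obtain ⟨k0, v0⟩ := p
    simp only [List.map_cons, List.nodup_cons] at h
    simp only [List.map_cons]
    congr 1
    · simp [PySem.Dict.getD_eq_get?_getD, PySem.Dict.get?_mk_cons]
    · calc t = (t.map Prod.fst).map (fun k => (k, (PySem.Dict.mk t).getD k 0)) := ih h.2
        _ = (t.map Prod.fst).map (fun k => (k, (PySem.Dict.mk ((k0, v0) :: t)).getD k 0)) := by
            apply List.map_congr_left
            intro k hk
            have hne : ¬(k0 = k) := fun he => h.1 (he ▸ hk)
            simp [PySem.Dict.getD_eq_get?_getD, PySem.Dict.get?_mk_cons, hne]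

-- full characterisation of A's dict after the nested loops
theorem loopA_items (xs : List String) :
    ((xs.foldl (fun d v => xs.foldl (pvStepA v) d) PySem.Dict.empty).items)
      = (PySem.Set.ofList xs).map (fun k => (k, (xs.count k : Int) * (xs.count k : Int))) := by
  set D := xs.foldl (fun d v => xs.foldl (pvStepA v) d) PySem.Dict.empty with hD
  have hkeys : D.keys = PySem.Set.ofList xs := by
    cases xs with
    | nil => rfl
    | cons x t =>
      have hof : PySem.Set.update (PySem.Dict.empty : PySem.Dict String Int).keys (x :: t)
          = PySem.Set.ofList (x :: t) := by
        simp [PySem.Dict.keys_empty, PySem.Set.update, PySem.Set.ofList_eq_foldl]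
      rw [hD, List.foldl_cons, outerA_keys, innerA_keys, hof]
      intro y hy
      rw [innerA_keys, hof]
      exact (PySem.Set.mem_ofList _ _).mpr hy
  have hnd : ((D.items).map Prod.fst).Nodup := by
    have : D.items.map Prod.fst = D.keys := rfl
    rw [this, hkeys]; exact PySem.Set.nodup_ofList xs
  have hval : ∀ k, D.getD k 0 = (xs.count k : Int) * (xs.count k : Int) := by
    intro k
    rw [hD, outerA_getD]
    simp [PySem.Dict.getD_empty]
  have hmk : PySem.Dict.mk D.items = D := rfl
  calc D.items = (D.items.map Prod.fst).map (fun k => (k, (PySem.Dict.mk D.items).getD k 0)) :=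
        pvItems_eq_map_keys _ hnd
    _ = (PySem.Set.ofList xs).map (fun k => (k, (xs.count k : Int) * (xs.count k : Int))) := by
        rw [hmk, show D.items.map Prod.fst = D.keys from rfl, hkeys]
        exact List.map_congr_left (fun k _ => by rw [hval])

-- ===== VERDICT (by name: the statement is the Claim_ definition above) =====
theorem analyze_chord_pairs_spec : Claim_equal_analyze_chord_pairs := by
  intro xs _
  unfold Spec_analyze_chord_pairs analyze_chord_pairs analyze_chord_pairs_alt
  rw [PySem.Dict.foldl_insert_getD_add_one_eq_counter, PySem.Dict.items_counter]
  have h1 : (PySem.List.pyRange 0 (PySem.List.len xs) 1).foldl (fun d z =>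
      (PySem.List.pyRange 0 (PySem.List.len xs) 1).foldl (fun d j =>
        pvStepA (PySem.List.pyGetD xs z "") d (PySem.List.pyGetD xs j "")) d)
      PySem.Dict.empty
      = xs.foldl (fun d v => xs.foldl (pvStepA v) d) PySem.Dict.empty := by
    have hin : ∀ (v : String) (d : PySem.Dict String Int),
        (PySem.List.pyRange 0 (PySem.List.len xs) 1).foldl
          (fun d j => pvStepA v d (PySem.List.pyGetD xs j "")) d
        = xs.foldl (pvStepA v) d := fun v d =>
      PySem.List.foldl_pyRange_zero_pyGetD xs "" (pvStepA v) d
    rw [PySem.List.foldl_pyRange_zero_pyGetD xs ""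
      (fun d v => (PySem.List.pyRange 0 (PySem.List.len xs) 1).foldl
        (fun d j => pvStepA v d (PySem.List.pyGetD xs j "")) d) PySem.Dict.empty]
    exact PySem.List.foldl_congr_mem xs _ _ PySem.Dict.empty (fun acc x _ => hin x acc)
  rw [h1, loopA_items, List.map_map]
  apply List.map_congr_left
  intro k _
  simp only [Function.comp]
  congr 1
  have : ((xs.count k : Int) * (xs.count k : Int)).toNat = xs.count k * xs.count k := by
    exact_mod_cast Int.toNat_natCast (xs.count k * xs.count k)
  rw [this, Nat.sqrt_eq]
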